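-- pv_equiv track=rewrite | github.com/lokanathmeher19/Cybersecurity_Project | password_checker/password-py/checker.py | _check_numeric_sequences
-- ===== SOURCE A (Python) =====
-- from typing import Dict, List, Tuple, Any
--
-- def _check_numeric_sequences(password: str) -> Tuple[int, bool]:
--     """Check for serial numbers and phone number patterns."""
--     # Common phone number and serial patterns
--     numeric_patterns = [
--         '0123456789',  # Full ascending sequence
--         '9876543210',  # Full descending sequence
--         '1234567890',  # Common numeric pattern
--         '0987654321',  # Reverse numeric pattern
--         '01234567',    # Phone-like ascending
--         '87654321',    # Phone-like descending
--         '1234567',     # Short ascending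
--         '7654321',     # Short descending
--     ]
--
--     for pattern in numeric_patterns:
--         if pattern in password:
--             return 0, False
--
--     # Also check for common phone number formats
--     phone_pattern_checks = [
--         '1111111', '2222222', '3333333', '4444444', '5555555',
--         '6666666', '7777777', '8888888', '9999999', '0000000'
--     ]
--
--     for pattern in phone_pattern_checks:
--         if pattern in password:
--             return 0, False
--
--     return 5, True
-- ===== SOURCE B (Python) =====
-- def _check_numeric_sequences(password: str):
--     """Check for serial numbers and phone number patterns."""
--     sequence_patterns = (
--         '0123456789', '9876543210', '1234567890', '0987654321',
--         '01234567', '87654321', '1234567', '7654321',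
--     )
--     if any(p in password for p in sequence_patterns):
--         return 0, False
--
--     # One left-to-right pass replaces the ten repeated-digit substring checks:
--     # track the current character and its consecutive run length.
--     cur = None
--     run = 0
--     for ch in password:
--         run = run + 1 if ch == cur else 1
--         cur = ch
--         if run >= 7 and ch in '0123456789':
--             return 0, False
--
--     return 5, True
-- ===== Notes on version B (the rewrite author's own statement) =====
-- stated objective: alternative
-- what changed: The eight ascending/descending sequence substring tests are kept, but the ten seven-identical-digit substring searches are replaced by a single left-to-right run-length scan that tracks the current character and its consecutive run length.
import Mathlib
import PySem

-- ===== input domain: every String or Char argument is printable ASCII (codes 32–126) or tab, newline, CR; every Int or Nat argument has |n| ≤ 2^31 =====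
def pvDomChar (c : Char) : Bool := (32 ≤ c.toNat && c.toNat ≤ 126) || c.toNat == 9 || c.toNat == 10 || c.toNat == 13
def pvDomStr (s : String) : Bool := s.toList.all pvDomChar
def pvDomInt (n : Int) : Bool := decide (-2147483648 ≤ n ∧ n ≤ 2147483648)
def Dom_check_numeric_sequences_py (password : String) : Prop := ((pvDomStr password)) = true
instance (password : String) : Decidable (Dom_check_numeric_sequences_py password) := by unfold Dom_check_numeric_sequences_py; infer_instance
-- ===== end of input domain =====

-- B replaces A's ten seven-identical-digit substring searches by a single run-length
-- scan of the password; the eight ascending/descending sequence substring tests stay.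

-- ===== PORT A =====
-- A's 'for pattern in pats: if pattern in password: return' loop, as first-match recursion.
def pvLoopA (pats : List String) (password : String) : Bool :=
  match pats with
  | [] => false
  | p :: rest => if PySem.Str.isIn p password then true else pvLoopA rest password

def check_numeric_sequences_py (password : String) : Int × Bool :=
  let numeric_patterns : List String :=
    ["0123456789", "9876543210", "1234567890", "0987654321",
     "01234567", "87654321", "1234567", "7654321"]
  if pvLoopA numeric_patterns password then (0, false)
  else
    let phone_pattern_checks : List String :=
      ["1111111", "2222222", "3333333", "4444444", "5555555",
       "6666666", "7777777", "8888888", "9999999", "0000000"]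
    if pvLoopA phone_pattern_checks password then (0, false)
    else (5, true)

-- ===== PORT B =====
def pvDigits : List Char := ['0', '1', '2', '3', '4', '5', '6', '7', '8', '9']

-- B's run-length loop: `cur` is the previous character (none before the first),
-- `run` the length of the current consecutive run; true iff the loop hits
-- `run >= 7 and ch in '0123456789'`.
def pvRunScan (l : List Char) (cur : Option Char) (run : Nat) : Bool :=
  match l with
  | [] => false
  | ch :: rest =>
    let run' := if some ch == cur then run + 1 else 1
    if 7 ≤ run' ∧ pvDigits.contains ch then true else pvRunScan rest (some ch) run'

def check_numeric_sequences_py_alt (password : String) : Int × Bool :=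
  let sequence_patterns : List String :=
    ["0123456789", "9876543210", "1234567890", "0987654321",
     "01234567", "87654321", "1234567", "7654321"]
  if sequence_patterns.any (fun p => PySem.Str.isIn p password) then (0, false)
  else if pvRunScan password.toList none 0 then (0, false)
  else (5, true)

-- ===== PRECONDITION & SPEC =====
def Spec_check_numeric_sequences_py (password : String) (out : Int × Bool) : Prop := out = check_numeric_sequences_py_alt password
instance (password : String) (out : Int × Bool) : Decidable (Spec_check_numeric_sequences_py password out) := by unfold Spec_check_numeric_sequences_py; infer_instance

-- ===== CLAIM (what is proved, stated in full; the proofs are below) =====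
def Claim_equal_check_numeric_sequences_py : Prop := ∀ (password : String), Dom_check_numeric_sequences_py password → Spec_check_numeric_sequences_py password (check_numeric_sequences_py password)

-- ===== LEMMAS AND PROOFS =====

-- A's first-match loop is List.any.
theorem pvLoopA_eq_any (pats : List String) (password : String) :
    pvLoopA pats password = pats.any (fun p => PySem.Str.isIn p password) := by
  induction pats with
  | nil => rfl
  | cons p rest ih =>
    simp only [pvLoopA, ih, List.any_cons]
    split_ifs <;> simp_all

theorem pvIsIn_iff (p pw : String) : PySem.Str.isIn p pw = true ↔ p.toList <:+: pw.toList := by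
  simp [pysem]

-- replicate k c is a prefix of a longer block of c followed by anything.
theorem pvRepPrefixAppend {k r : Nat} {c : Char} (rest : List Char) (h : k ≤ r) :
    List.replicate k c <+: List.replicate r c ++ rest :=
  List.IsPrefix.trans
    (by simp only [List.prefix_iff_eq_take, List.length_replicate, List.take_replicate,
          List.replicate_inj, left_eq_inf, or_true, and_true]; exact h)
    (List.prefix_append _ _)

-- same-character block before a boundary character a ≠ c₀: a prefix run of c₀ cannot cross it.
theorem pvRepPrefixSame (c₀ a : Char) (t : List Char) (hne : a ≠ c₀) :
    ∀ (k r : Nat), (List.replicate k c₀ <+: List.replicate r c₀ ++ a :: t) ↔ k ≤ r := by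
  intro k
  induction k with
  | zero => intro r; simp
  | succ k ih =>
    intro r
    cases r with
    | zero =>
      simp only [List.replicate_zero, List.nil_append, List.replicate_succ,
        List.cons_prefix_cons]
      constructor
      · rintro ⟨h1, _⟩; exact absurd h1.symm hne
      · omega
    | succ r =>
      simp only [List.replicate_succ, List.cons_append, List.cons_prefix_cons,
        true_and]
      rw [ih r]
      omega

-- a nonempty prefix run of c starting at a c₀-block forces c = c₀.
theorem pvRepPrefixIff (c c₀ a : Char) (t : List Char) (hne : a ≠ c₀) (k r : Nat) :
    (List.replicate (k + 1) c <+: List.replicate (r + 1) c₀ ++ a :: t) ↔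
      (c = c₀ ∧ k + 1 ≤ r + 1) := by
  rw [show List.replicate (r + 1) c₀ ++ a :: t = c₀ :: (List.replicate r c₀ ++ a :: t) by
        simp [List.replicate_succ],
      List.replicate_succ, List.cons_prefix_cons]
  constructor
  · rintro ⟨h1, h2⟩
    subst h1
    exact ⟨rfl, by have := (pvRepPrefixSame c a t hne k r).mp h2; omega⟩
  · rintro ⟨h1, h2⟩
    subst h1
    exact ⟨rfl, (pvRepPrefixSame c a t hne k r).mpr (by omega)⟩

-- a 7-run infix of (c₀-block ++ a :: t) with a ≠ c₀ lies wholly in the block or in a :: t.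
theorem pvRepInfixAppend (c c₀ a : Char) (t : List Char) (hne : a ≠ c₀) :
    ∀ (r : Nat), (List.replicate 7 c <:+: List.replicate r c₀ ++ a :: t) ↔
      ((c = c₀ ∧ 7 ≤ r) ∨ List.replicate 7 c <:+: a :: t) := by
  intro r
  induction r with
  | zero => simp
  | succ r ih =>
    rw [show List.replicate (r + 1) c₀ ++ a :: t = c₀ :: (List.replicate r c₀ ++ a :: t) by
          simp [List.replicate_succ],
        List.infix_cons_iff, ih,
        show c₀ :: (List.replicate r c₀ ++ a :: t) = List.replicate (r + 1) c₀ ++ a :: t by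
          simp [List.replicate_succ],
        show (7 : Nat) = 6 + 1 by rfl,
        pvRepPrefixIff c c₀ a t hne 6 r]
    constructor
    · rintro (⟨h1, h2⟩ | ⟨h1, h2⟩ | h) <;> try exact Or.inl ⟨h1, by omega⟩
      exact Or.inr h
    · rintro (⟨h1, h2⟩ | h)
      · exact Or.inl ⟨h1, by omega⟩
      · exact Or.inr (Or.inr h)

-- invariant of B's run-length scan, relative to the pending run (replicate r c₀).
theorem pvRunScan_spec (l : List Char) : ∀ (c₀ : Char) (r : Nat),
    ¬(pvDigits.contains c₀ = true ∧ 7 ≤ r) →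
    (pvRunScan l (some c₀) r = true ↔
      ∃ c, pvDigits.contains c = true ∧
        List.replicate 7 c <:+: List.replicate r c₀ ++ l) := by
  induction l with
  | nil =>
    intro c₀ r hinv
    simp only [pvRunScan, List.append_nil, Bool.false_eq_true, false_iff]
    rintro ⟨c, hc, hinf⟩
    have hceq : c = c₀ :=
      List.eq_of_mem_replicate (hinf.subset (by simp))
    have hlen := hinf.length_le
    simp only [List.length_replicate] at hlen
    exact hinv ⟨hceq ▸ hc, hlen⟩
  | cons ch rest ih =>
    intro c₀ r hinv
    by_cases hch : ch = c₀
    · subst hch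
      have hblock : List.replicate r ch ++ ch :: rest = List.replicate (r + 1) ch ++ rest := by
        simp [List.replicate_succ']
      simp only [pvRunScan, beq_self_eq_true, if_true]
      by_cases hd : 7 ≤ r + 1 ∧ pvDigits.contains ch = true
      · rw [if_pos hd]
        simp only [true_iff]
        refine ⟨ch, hd.2, ?_⟩
        rw [hblock]
        exact (pvRepPrefixAppend rest (by omega)).isInfix
      · rw [if_neg hd, ih ch (r + 1) (fun h => hd ⟨h.2, h.1⟩), hblock]
    · have hbeq : (some ch == some c₀) = false := by
        simp [hch]
      simp only [pvRunScan, hbeq, Bool.false_eq_true, if_false]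
      rw [if_neg (by omega : ¬(7 ≤ 1 ∧ pvDigits.contains ch = true)),
          ih ch 1 (by omega)]
      simp only [List.replicate_one, List.singleton_append]
      constructor
      · rintro ⟨c, hc, hinf⟩
        exact ⟨c, hc, (pvRepInfixAppend c c₀ ch rest hch r).mpr (Or.inr hinf)⟩
      · rintro ⟨c, hc, hinf⟩
        rcases (pvRepInfixAppend c c₀ ch rest hch r).mp hinf with ⟨h1, h2⟩ | h
        · exact absurd ⟨h1 ▸ hc, h2⟩ hinv
        · exact ⟨c, hc, h⟩

-- B's scan finds exactly the strings containing seven consecutive equal digits.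
theorem pvRunScan_top (l : List Char) :
    pvRunScan l none 0 = true ↔
      ∃ c, pvDigits.contains c = true ∧ List.replicate 7 c <:+: l := by
  cases l with
  | nil =>
    simp only [pvRunScan, Bool.false_eq_true, false_iff]
    rintro ⟨c, _, hinf⟩
    have := hinf.length_le
    simp at this
  | cons a t =>
    simp only [pvRunScan, show (some a == (none : Option Char)) = false from rfl,
      Bool.false_eq_true, if_false]
    rw [if_neg (by omega : ¬(7 ≤ 1 ∧ pvDigits.contains a = true)),
        pvRunScan_spec t a 1 (by omega)]
    simp [List.replicate_one]

-- A's phone-pattern loop agrees with B's run-length scan.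
theorem pvPhone_eq_scan (password : String) :
    pvLoopA ["1111111", "2222222", "3333333", "4444444", "5555555",
             "6666666", "7777777", "8888888", "9999999", "0000000"] password
      = pvRunScan password.toList none 0 := by
  rw [pvLoopA_eq_any, Bool.eq_iff_iff, pvRunScan_top]
  simp only [List.any_eq_true]
  constructor
  · rintro ⟨p, hp, hin⟩
    have hinf := (pvIsIn_iff p password).mp hin
    fin_cases hp
    · exact ⟨'1', by decide, hinf⟩
    · exact ⟨'2', by decide, hinf⟩
    · exact ⟨'3', by decide, hinf⟩
    · exact ⟨'4', by decide, hinf⟩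
    · exact ⟨'5', by decide, hinf⟩
    · exact ⟨'6', by decide, hinf⟩
    · exact ⟨'7', by decide, hinf⟩
    · exact ⟨'8', by decide, hinf⟩
    · exact ⟨'9', by decide, hinf⟩
    · exact ⟨'0', by decide, hinf⟩
  · rintro ⟨c, hc, hinf⟩
    have hm : c ∈ pvDigits := by simpa using hc
    fin_cases hm
    · exact ⟨"0000000", by simp, (pvIsIn_iff _ _).mpr hinf⟩
    · exact ⟨"1111111", by simp, (pvIsIn_iff _ _).mpr hinf⟩
    · exact ⟨"2222222", by simp, (pvIsIn_iff _ _).mpr hinf⟩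
    · exact ⟨"3333333", by simp, (pvIsIn_iff _ _).mpr hinf⟩
    · exact ⟨"4444444", by simp, (pvIsIn_iff _ _).mpr hinf⟩
    · exact ⟨"5555555", by simp, (pvIsIn_iff _ _).mpr hinf⟩
    · exact ⟨"6666666", by simp, (pvIsIn_iff _ _).mpr hinf⟩
    · exact ⟨"7777777", by simp, (pvIsIn_iff _ _).mpr hinf⟩
    · exact ⟨"8888888", by simp, (pvIsIn_iff _ _).mpr hinf⟩
    · exact ⟨"9999999", by simp, (pvIsIn_iff _ _).mpr hinf⟩

-- ===== VERDICT (by name: the statement is the Claim_ definition above) =====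
theorem check_numeric_sequences_py_spec : Claim_equal_check_numeric_sequences_py := by
  intro password _
  unfold Spec_check_numeric_sequences_py check_numeric_sequences_py check_numeric_sequences_py_alt
  have h2 : (["1111111", "2222222", "3333333", "4444444", "5555555",
              "6666666", "7777777", "8888888", "9999999", "0000000"].any
        (fun p => PySem.Str.isIn p password)) = pvRunScan password.toList none 0 := by
    rw [← pvLoopA_eq_any, pvPhone_eq_scan]
  simp only [pvLoopA_eq_any, h2]
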